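-- pv_equiv track=rewrite | github.com/kartikeymahajan/Practice_Codes | OJT-Ramita/DAY-01/Pro1.py | func
-- ===== SOURCE A (Python) =====
-- def func(li):
--     water = 0
--     counter1 = 0
--     for i in range(len(li)-1):
--         if li[i]>li[i+1]:
--             current = li[i]
--             # flag = True
--             for j in range(i+2, len(li)):
--                 water += current - li[j-1]
--                 if li[j]>=current:
--                     # flag = False
--                     break
--                 if j == len(li)-1:
--                     water = 0
--     return water
-- ===== SOURCE B (Python) =====
-- def func(li):
--     # Staged O(n) pipeline: prefix sums + a monotonic stack that precomputes, for
--     # every index, the next index to the right whose value is >= li[i]; the final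
--     # pass sums each drop's fill in closed form and zeroes the total on a no-wall drop.
--     n = len(li)
--     pref = [0] * (n + 1)
--     for k in range(n):
--         pref[k + 1] = pref[k] + li[k]
--     nge = [n] * n
--     stack = []
--     for i in range(n - 1, -1, -1):
--         while stack and li[stack[-1]] < li[i]:
--             stack.pop()
--         nge[i] = stack[-1] if stack else n
--         stack.append(i)
--     total = 0
--     for i in range(n - 2):
--         if li[i] > li[i + 1]:
--             m = nge[i]
--             if m == n:
--                 total = 0
--             else:
--                 total += (m - i - 1) * li[i] - (pref[m] - pref[i + 1])
--     return total
-- ===== Notes on version B (the rewrite author's own statement) =====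
-- stated objective: faster
-- what changed: Replaces A's nested forward scans (for each drop, rescan right for the first wall) by a staged O(n) pipeline: a prefix-sum array, a right-to-left monotonic-stack pass precomputing every index's next-greater-or-equal index, and one final pass that adds each drop's fill in closed form from the two tables (zeroing the total at a no-wall drop, as A does).
import Mathlib
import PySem

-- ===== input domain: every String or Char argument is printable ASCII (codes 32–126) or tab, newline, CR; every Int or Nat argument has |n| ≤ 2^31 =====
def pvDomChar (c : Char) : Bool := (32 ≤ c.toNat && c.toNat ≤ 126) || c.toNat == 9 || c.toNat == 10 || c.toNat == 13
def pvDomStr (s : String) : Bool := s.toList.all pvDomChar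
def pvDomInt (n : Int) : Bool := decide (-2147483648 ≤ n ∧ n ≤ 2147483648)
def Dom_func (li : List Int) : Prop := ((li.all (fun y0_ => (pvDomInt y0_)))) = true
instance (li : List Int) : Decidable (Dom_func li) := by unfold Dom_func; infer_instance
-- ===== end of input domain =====

-- B replaces A's nested forward scans by a staged O(n) pipeline: prefix sums,
-- a right-to-left monotonic-stack pass precomputing next-greater-or-equal indices,
-- and one closed-form summing pass; a timing run reports it measurably faster.

-- ===== PORT A =====
def funcInner (li : List Int) (current : Int) : List Int → Int → Int
  | [], water => water
  | j :: rest, water =>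
    let w1 := water + (current - PySem.List.pyGetD li (j - 1) 0)
    if PySem.List.pyGetD li j 0 ≥ current then w1
    else
      let w2 := if j = (li.length : Int) - 1 then 0 else w1
      funcInner li current rest w2

def func (li : List Int) : Int :=
  (PySem.List.pyRange 0 ((li.length : Int) - 1) 1).foldl
    (fun water i =>
      if PySem.List.pyGetD li i 0 > PySem.List.pyGetD li (i + 1) 0 then
        funcInner li (PySem.List.pyGetD li i 0)
          (PySem.List.pyRange (i + 2) (li.length : Int) 1) water
      else water) 0

-- ===== PORT B =====
-- pref[k+1] = pref[k] + li[k] : the scan producing pref[1..n]; pref = 0 :: prefGo li 0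
def prefGo : List Int → Int → List Int
  | [], _ => []
  | x :: xs, s => (s + x) :: prefGo xs (s + x)

-- right-to-left monotonic stack (top at head); nge entries are prepended, so the
-- accumulator ends up in index order
def ngeGo (li : List Int) (n : Int) : List Int → List Int → List Int → List Int
  | [], _stack, nge => nge
  | i :: rest, stack, nge =>
    let stack' := stack.dropWhile
      (fun t => decide (PySem.List.pyGetD li t 0 < PySem.List.pyGetD li i 0))
    let m := match stack' with | [] => n | t :: _ => t
    ngeGo li n rest (i :: stack') (m :: nge)

def func_alt (li : List Int) : Int :=
  let n : Int := (li.length : Int)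
  let pref : List Int := 0 :: prefGo li 0
  let nge : List Int := ngeGo li n (PySem.List.pyRange (n - 1) (-1) (-1)) [] []
  (PySem.List.pyRange 0 (n - 2) 1).foldl
    (fun total i =>
      if PySem.List.pyGetD li i 0 > PySem.List.pyGetD li (i + 1) 0 then
        let m := PySem.List.pyGetD nge i 0
        if m = n then 0
        else total + ((m - i - 1) * PySem.List.pyGetD li i 0
          - (PySem.List.pyGetD pref m 0 - PySem.List.pyGetD pref (i + 1) 0))
      else total) 0

-- ===== PRECONDITION & SPEC =====
def Spec_func (li : List Int) (out : Int) : Prop := out = func_alt li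
instance (li : List Int) (out : Int) : Decidable (Spec_func li out) := by unfold Spec_func; infer_instance

-- ===== CLAIM (what is proved, stated in full; the proofs are below) =====
def Claim_equal_func : Prop := ∀ (li : List Int), Dom_func li → Spec_func li (func li)

-- ===== LEMMAS AND PROOFS =====

-- the common per-index step both programs compute
def stepW (li : List Int) (w i : Int) : Int :=
  if PySem.List.pyGetD li i 0 > PySem.List.pyGetD li (i + 1) 0 then
    match (PySem.List.pyRange (i + 2) (li.length : Int) 1).find?
        (fun j => decide (PySem.List.pyGetD li j 0 ≥ PySem.List.pyGetD li i 0)) with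
    | none => if (li.length : Int) ≤ i + 2 then w else 0
    | some m =>
        w + ((m - i - 1) * PySem.List.pyGetD li i 0 - ((PySem.List.pyRange (i + 1) m 1).map (fun j => PySem.List.pyGetD li j 0)).sum)
  else w

lemma inner_eq (li : List Int) (cur : Int) :
    ∀ (k : Nat) (s water : Int), ((li.length : Int) - s).toNat ≤ k →
    funcInner li cur (PySem.List.pyRange s (li.length : Int) 1) water =
      match (PySem.List.pyRange s (li.length : Int) 1).find?
          (fun j => decide (PySem.List.pyGetD li j 0 ≥ cur)) with
      | none => if (li.length : Int) ≤ s then water else 0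
      | some m =>
          water + ((m - s + 1) * cur - ((PySem.List.pyRange (s - 1) m 1).map (fun j => PySem.List.pyGetD li j 0)).sum) := by
  intro k
  induction k with
  | zero =>
    intro s water h
    have hns : (li.length : Int) ≤ s := by omega
    rw [PySem.List.pyRange_one_eq_nil hns]
    simp [funcInner, hns]
  | succ k ih =>
    intro s water h
    by_cases hns : (li.length : Int) ≤ s
    · rw [PySem.List.pyRange_one_eq_nil hns]
      simp [funcInner, hns]
    · have hsn : s < (li.length : Int) := by omega
      rw [PySem.List.pyRange_one_cons hsn]
      by_cases hwall : PySem.List.pyGetD li s 0 ≥ cur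
      · rw [List.find?_cons_of_pos (by simpa using hwall)]
        have hsing : PySem.List.pyRange (s - 1) s 1 = [s - 1] := by
          have := PySem.List.pyRange_one_singleton (a := s - 1)
          simpa using this
        simp only [funcInner, if_pos hwall, hsing, List.map_cons, List.map_nil, List.sum_cons,
          List.sum_nil]
        ring
      · rw [List.find?_cons_of_neg (by simpa using hwall)]
        simp only [funcInner, if_neg hwall]
        by_cases hlast : s = (li.length : Int) - 1
        · have hnil : PySem.List.pyRange (s + 1) (li.length : Int) 1 = [] :=
            PySem.List.pyRange_one_eq_nil (by omega)
          rw [hnil]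
          simp [funcInner, hlast]
        · have hrec := ih (s + 1) (if s = (li.length : Int) - 1 then 0
              else water + (cur - PySem.List.pyGetD li (s - 1) 0)) (by omega)
          rw [if_neg hlast] at hrec
          rw [if_neg hlast, hrec]
          rcases hf : (PySem.List.pyRange (s + 1) (li.length : Int) 1).find?
              (fun j => decide (PySem.List.pyGetD li j 0 ≥ cur)) with _ | m
          · simp only
            rw [if_neg (by omega), if_neg hns]
          · have hm : m ∈ PySem.List.pyRange (s + 1) (li.length : Int) 1 :=
              List.mem_of_find?_eq_some hf
            have hm' := (PySem.List.mem_pyRange_one).1 hm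
            have hcons : PySem.List.pyRange (s - 1) m 1 = (s - 1) :: PySem.List.pyRange s m 1 := by
              have := PySem.List.pyRange_one_cons (a := s - 1) (b := m) (by omega)
              simpa using this
            simp only [hcons, List.map_cons, List.sum_cons]
            have h1 : s + 1 - 1 = s := by ring
            rw [h1]
            ring

lemma func_eq_fold (li : List Int) :
    func li = (PySem.List.pyRange 0 ((li.length : Int) - 1) 1).foldl (stepW li) 0 := by
  unfold func
  apply PySem.List.foldl_congr_mem
  intro acc i hi
  have hi' := (PySem.List.mem_pyRange_one).1 hi
  simp only [stepW]
  by_cases ht : PySem.List.pyGetD li i 0 > PySem.List.pyGetD li (i + 1) 0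
  · rw [if_pos ht, if_pos ht,
      inner_eq li (PySem.List.pyGetD li i 0) ((li.length : Int) - (i + 2)).toNat (i + 2) acc le_rfl]
    split
    · rfl
    · simp only [show (i : Int) + 2 - 1 = i + 1 by ring]
      ring
  · rw [if_neg ht, if_neg ht]

lemma stepW_last (li : List Int) (w : Int) :
    stepW li w ((li.length : Int) - 2) = w := by
  unfold stepW
  rw [show ((li.length : Int) - 2 + 2) = (li.length : Int) by ring,
    PySem.List.pyRange_one_eq_nil le_rfl]
  simp only [List.find?_nil]
  split_ifs <;> first | rfl | omega

-- ---------- B side: the monotonic stack ----------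

-- the value B's nge[i] must take: first index j > i with li[j] >= li[i], else n
def ngeF (li : List Int) (n i : Int) : Int :=
  match (PySem.List.pyRange (i + 1) n 1).find?
      (fun j => decide (PySem.List.pyGetD li j 0 ≥ PySem.List.pyGetD li i 0)) with
  | none => n
  | some m => m

-- the stack contents after all indices ≥ i are processed: the left-to-right maxima
-- of li over [i, n) (j kept iff li[k] ≤ li[j] for all i ≤ k < j), top at head
def goodP (li : List Int) (i j : Int) : Bool :=
  decide (∀ k ∈ PySem.List.pyRange i j 1,
    PySem.List.pyGetD li k 0 ≤ PySem.List.pyGetD li j 0)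

def goodStack (li : List Int) (n i : Int) : List Int :=
  (PySem.List.pyRange i n 1).filter (goodP li i)

lemma find?_pyRange_minimal (p : Int → Bool) :
    ∀ (c : Nat) (a b m : Int), (b - a).toNat ≤ c →
      (PySem.List.pyRange a b 1).find? p = some m →
      ∀ k, a ≤ k → k < m → p k = false := by
  intro c
  induction c with
  | zero =>
    intro a b m h hf
    rw [PySem.List.pyRange_one_eq_nil (by omega)] at hf
    simp at hf
  | succ c ih =>
    intro a b m h hf k hak hkm
    by_cases hab : b ≤ a
    · rw [PySem.List.pyRange_one_eq_nil hab] at hf; simp at hf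
    · rw [PySem.List.pyRange_one_cons (by omega)] at hf
      by_cases hpa : p a = true
      · rw [List.find?_cons_of_pos hpa] at hf
        have : m = a := by exact (Option.some_inj.mp hf).symm
        omega
      · rw [List.find?_cons_of_neg (by simpa using hpa)] at hf
        by_cases hka : k = a
        · subst hka; simpa using hpa
        · exact ih (a + 1) b m (by omega) hf k (by omega) hkm

lemma goodStack_pairwise (li : List Int) (n i : Int) :
    (goodStack li n i).Pairwise
      (fun a b => PySem.List.pyGetD li a 0 ≤ PySem.List.pyGetD li b 0) := by
  have hlt : (goodStack li n i).Pairwise (· < ·) :=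
    (PySem.List.pairwise_lt_pyRange_one (a := i) (b := n)).sublist
      List.filter_sublist
  refine List.Pairwise.imp_of_mem ?_ hlt
  intro a b ha hb hab
  have hb' := List.mem_filter.1 hb
  have hbP := of_decide_eq_true (by simpa [goodP] using hb'.2 :
    decide (∀ k ∈ PySem.List.pyRange i b 1,
      PySem.List.pyGetD li k 0 ≤ PySem.List.pyGetD li b 0) = true)
  have ha' := List.mem_filter.1 ha
  have haR := (PySem.List.mem_pyRange_one).1 ha'.1
  exact hbP a ((PySem.List.mem_pyRange_one).2 ⟨haR.1, hab⟩)

-- general: on an f-nondecreasing list, keeping the elements ≥ c is dropping the prefix < c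
lemma filter_le_eq_dropWhile (f : Int → Int) (c : Int) :
    ∀ l : List Int, l.Pairwise (fun a b => f a ≤ f b) →
      l.filter (fun t => decide (c ≤ f t)) = l.dropWhile (fun t => decide (f t < c)) := by
  intro l
  induction l with
  | nil => intro _; rfl
  | cons a l ih =>
    intro hp
    rw [List.pairwise_cons] at hp
    by_cases hc : f a < c
    · rw [List.filter_cons_of_neg (by simpa using (by omega : ¬ c ≤ f a)),
        List.dropWhile_cons_of_pos (by simpa using hc)]
      exact ih hp.2
    · rw [List.filter_cons_of_pos (by simpa using (by omega : c ≤ f a)),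
        List.dropWhile_cons_of_neg (by simpa using hc)]
      congr 1
      exact List.filter_eq_self.2 (fun b hb => by
        have := hp.1 b hb
        simpa using (by omega : c ≤ f b))

-- one step of the stack pass: popping then pushing i turns goodStack (i+1) into goodStack i
lemma goodStack_step (li : List Int) (n i : Int) (h : i < n) :
    goodStack li n i = i :: (goodStack li n (i + 1)).dropWhile
      (fun t => decide (PySem.List.pyGetD li t 0 < PySem.List.pyGetD li i 0)) := by
  unfold goodStack
  rw [PySem.List.pyRange_one_cons h, List.filter_cons_of_pos (by
    simp [goodP, PySem.List.pyRange_one_eq_nil (le_refl i)])]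
  congr 1
  have hcong : (PySem.List.pyRange (i + 1) n 1).filter (goodP li i)
      = (PySem.List.pyRange (i + 1) n 1).filter
      (fun j => decide (PySem.List.pyGetD li i 0 ≤ PySem.List.pyGetD li j 0) &&
        goodP li (i + 1) j) := by
    apply List.filter_congr
    intro j hj
    have hj' := (PySem.List.mem_pyRange_one).1 hj
    simp only [goodP]
    rw [PySem.List.pyRange_one_cons (by omega : i < j)]
    simp [Bool.decide_and]
  rw [hcong, ← List.filter_filter]
  exact filter_le_eq_dropWhile (fun t => PySem.List.pyGetD li t 0) (PySem.List.pyGetD li i 0)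
    _ (goodStack_pairwise li n (i + 1))

-- after popping, the top of the stack is exactly ngeF (or the stack is empty iff none)
lemma goodStack_top (li : List Int) (n i : Int) :
    (match (goodStack li n (i + 1)).dropWhile
        (fun t => decide (PySem.List.pyGetD li t 0 < PySem.List.pyGetD li i 0)) with
      | [] => n
      | t :: _ => t) = ngeF li n i := by
  unfold ngeF
  rcases hf : (PySem.List.pyRange (i + 1) n 1).find?
      (fun j => decide (PySem.List.pyGetD li j 0 ≥ PySem.List.pyGetD li i 0)) with _ | m
  · -- no wall: every stack element is < li[i], dropWhile empties the stack
    have hall : ∀ j ∈ PySem.List.pyRange (i + 1) n 1,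
        PySem.List.pyGetD li j 0 < PySem.List.pyGetD li i 0 := by
      intro j hj
      have := List.find?_eq_none.1 hf j hj
      simpa using this
    have : (goodStack li n (i + 1)).dropWhile
        (fun t => decide (PySem.List.pyGetD li t 0 < PySem.List.pyGetD li i 0)) = [] := by
      rw [List.dropWhile_eq_nil_iff]
      intro t ht
      have ht' := List.mem_filter.1 ht
      simpa using hall t ht'.1
    rw [this]
  · have hm := (PySem.List.mem_pyRange_one).1 (List.mem_of_find?_eq_some hf)
    have hpm : PySem.List.pyGetD li m 0 ≥ PySem.List.pyGetD li i 0 := by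
      simpa using List.find?_some hf
    have hmin : ∀ k, i + 1 ≤ k → k < m →
        PySem.List.pyGetD li k 0 < PySem.List.pyGetD li i 0 := by
      intro k h1 h2
      have := find?_pyRange_minimal _ (n - (i + 1)).toNat (i + 1) n m le_rfl hf k h1 h2
      simpa using this
    -- split the stack at m
    have hsplit : goodStack li n (i + 1)
        = ((PySem.List.pyRange (i + 1) m 1).filter (goodP li (i + 1)))
          ++ m :: ((PySem.List.pyRange (m + 1) n 1).filter (goodP li (i + 1))) := by
      unfold goodStack
      rw [PySem.List.pyRange_one_append (i + 1) m n (by omega) (by omega),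
        List.filter_append, PySem.List.pyRange_one_cons (by omega : m < n),
        List.filter_cons_of_pos]
      simp only [goodP, decide_eq_true_eq]
      intro k hk
      have hk' := (PySem.List.mem_pyRange_one).1 hk
      have := hmin k hk'.1 hk'.2
      omega
    rw [hsplit, List.dropWhile_append]
    have hpre : (((PySem.List.pyRange (i + 1) m 1).filter (goodP li (i + 1)))).dropWhile
        (fun t => decide (PySem.List.pyGetD li t 0 < PySem.List.pyGetD li i 0)) = [] := by
      rw [List.dropWhile_eq_nil_iff]
      intro t ht
      have ht' := (PySem.List.mem_pyRange_one).1 (List.mem_filter.1 ht).1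
      simpa using hmin t ht'.1 ht'.2
    rw [hpre]
    simp only [List.isEmpty_nil, if_pos]
    rw [List.dropWhile_cons_of_neg (by simpa using (by omega : ¬ PySem.List.pyGetD li m 0 < PySem.List.pyGetD li i 0))]

lemma goodStack_empty (li : List Int) (n : Int) : goodStack li n n = [] := by
  unfold goodStack
  rw [PySem.List.pyRange_one_eq_nil le_rfl]
  rfl

-- the whole right-to-left pass computes [ngeF 0, …, ngeF (i-1)] ++ acc from goodStack i
lemma ngeGo_spec (li : List Int) (n : Int) :
    ∀ (c : Nat) (acc : List Int), (c : Int) ≤ n →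
      ngeGo li n (PySem.List.pyRange ((c : Int) - 1) (-1) (-1)) (goodStack li n c) acc
        = (PySem.List.pyRange 0 (c : Int) 1).map (ngeF li n) ++ acc := by
  intro c
  induction c with
  | zero =>
    intro acc _
    rw [PySem.List.pyRange_neg_one_eq_nil (by omega)]
    simp [ngeGo, PySem.List.pyRange_one_eq_nil (le_refl (0 : Int))]
  | succ c ih =>
    intro acc hc
    have hcn : (c : Int) < n := by push_cast at hc ⊢; omega
    rw [show (((c + 1 : Nat) : Int) - 1) = (c : Int) by push_cast; ring,
      PySem.List.pyRange_neg_one_cons (by omega : (-1 : Int) < (c : Int))]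
    show ngeGo li n ((c : Int) :: PySem.List.pyRange ((c : Int) - 1) (-1) (-1))
      (goodStack li n ((c : Nat) + 1)) acc = _
    have hstack : goodStack li n ((c : Nat) + 1) = goodStack li n ((c : Int) + 1) := by
      norm_num
    rw [hstack]
    simp only [ngeGo]
    rw [goodStack_top li n c, ← goodStack_step li n c hcn,
      ih (ngeF li n c :: acc) (by omega)]
    rw [show ((c + 1 : Nat) : Int) = (c : Int) + 1 by push_cast; ring,
      PySem.List.pyRange_one_succ_right (by omega : (0 : Int) ≤ (c : Int)),
      List.map_append]
    simp

-- the prefix-sum list: pref = [ (li.take k).sum for k in range(n+1) ]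
lemma prefGo_spec (li : List Int) :
    ∀ s, prefGo li s = (List.range li.length).map (fun k => s + (li.take (k + 1)).sum) := by
  induction li with
  | nil => intro s; rfl
  | cons x xs ih =>
    intro s
    simp only [prefGo, List.length_cons, List.range_succ_eq_map, List.map_cons, List.map_map]
    refine List.cons_eq_cons.2 ⟨by simp, ?_⟩
    rw [ih (s + x)]
    apply List.map_congr_left
    intro k _
    simp [List.take_succ_cons]
    ring

lemma pref_get (li : List Int) (m : Int) (h0 : 0 ≤ m) (hm : m ≤ (li.length : Int)) :
    PySem.List.pyGetD (0 :: prefGo li 0) m 0 = (li.take m.toNat).sum := by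
  have hlist : (0 : Int) :: prefGo li 0
      = (List.range (li.length + 1)).map (fun k => (li.take k).sum) := by
    rw [prefGo_spec li 0, List.range_succ_eq_map, List.map_cons, List.map_map]
    simp
  rw [hlist, PySem.List.pyGetD_eq_getElem _ _ (by omega)
    (by simp; omega)]
  simp

lemma range_map_sum (li : List Int) :
    ∀ (c : Nat) (a b : Int), (b - a).toNat ≤ c → 0 ≤ a → a ≤ b → b ≤ (li.length : Int) →
    ((PySem.List.pyRange a b 1).map (fun j => PySem.List.pyGetD li j 0)).sum
      = (li.take b.toNat).sum - (li.take a.toNat).sum := by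
  intro c
  induction c with
  | zero =>
    intro a b h h0 hab hb
    have : b = a := by omega
    subst this
    rw [PySem.List.pyRange_one_eq_nil le_rfl]
    simp
  | succ c ih =>
    intro a b h h0 hab hb
    by_cases hba : b = a
    · subst hba
      rw [PySem.List.pyRange_one_eq_nil le_rfl]; simp
    · have hlt : a ≤ b - 1 := by omega
      rw [show b = (b - 1) + 1 by ring, PySem.List.pyRange_one_succ_right hlt,
        List.map_append, List.sum_append,
        ih a (b - 1) (by omega) h0 hlt (by omega)]
      have hidx : (b - 1).toNat < li.length := by omega
      have htake : (li.take ((b - 1) + 1).toNat).sum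
          = (li.take (b - 1).toNat).sum + li[(b - 1).toNat] := by
        rw [show ((b - 1) + 1).toNat = (b - 1).toNat + 1 by omega]
        exact List.sum_take_succ li (b - 1).toNat hidx
      rw [htake]
      simp only [List.map_cons, List.map_nil, List.sum_cons, List.sum_nil]
      rw [PySem.List.pyGetD_eq_getElem li _ (by omega) (by omega)]
      ring

-- B's final pass computes the same fold of stepW over range(n-2)
lemma alt_eq_fold (li : List Int) :
    func_alt li = (PySem.List.pyRange 0 ((li.length : Int) - 2) 1).foldl (stepW li) 0 := by
  unfold func_alt
  simp only []
  have hnge : ngeGo li (li.length : Int)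
      (PySem.List.pyRange ((li.length : Int) - 1) (-1) (-1)) [] []
      = (PySem.List.pyRange 0 (li.length : Int) 1).map (ngeF li (li.length : Int)) := by
    have := ngeGo_spec li (li.length : Int) li.length []
      (by omega)
    rw [goodStack_empty] at this
    simpa using this
  rw [hnge]
  apply PySem.List.foldl_congr_mem
  intro acc i hi
  have hi' := (PySem.List.mem_pyRange_one).1 hi
  simp only [stepW]
  by_cases ht : PySem.List.pyGetD li i 0 > PySem.List.pyGetD li (i + 1) 0
  · rw [if_pos ht, if_pos ht]
    have hget : PySem.List.pyGetD
        ((PySem.List.pyRange 0 (li.length : Int) 1).map (ngeF li (li.length : Int))) i 0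
        = ngeF li (li.length : Int) i :=
      PySem.List.pyGetD_map_pyRange_of_nonneg _ _ _ _ hi'.1 (by omega)
    rw [hget]
    have hshift : (PySem.List.pyRange (i + 1) (li.length : Int) 1).find?
        (fun j => decide (PySem.List.pyGetD li j 0 ≥ PySem.List.pyGetD li i 0))
        = (PySem.List.pyRange (i + 2) (li.length : Int) 1).find?
        (fun j => decide (PySem.List.pyGetD li j 0 ≥ PySem.List.pyGetD li i 0)) := by
      rw [PySem.List.pyRange_one_cons (by omega : i + 1 < (li.length : Int)),
        List.find?_cons_of_neg (by simpa using (by omega : ¬ PySem.List.pyGetD li (i + 1) 0 ≥ PySem.List.pyGetD li i 0)),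
        show i + 1 + 1 = i + 2 by ring]
    unfold ngeF
    rw [hshift]
    rcases hf : (PySem.List.pyRange (i + 2) (li.length : Int) 1).find?
        (fun j => decide (PySem.List.pyGetD li j 0 ≥ PySem.List.pyGetD li i 0)) with _ | m
    · rw [if_pos (show (match (none : Option Int) with
          | none => (li.length : Int) | some m => m) = (li.length : Int) from rfl),
        if_neg (show ¬ ((li.length : Int) ≤ i + 2) from by omega)]
    · have hm := (PySem.List.mem_pyRange_one).1 (List.mem_of_find?_eq_some hf)
      show (if m = (li.length : Int) then 0
          else acc + ((m - i - 1) * PySem.List.pyGetD li i 0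
            - (PySem.List.pyGetD (0 :: prefGo li 0) m 0
              - PySem.List.pyGetD (0 :: prefGo li 0) (i + 1) 0)))
        = acc + ((m - i - 1) * PySem.List.pyGetD li i 0
            - ((PySem.List.pyRange (i + 1) m 1).map (fun j => PySem.List.pyGetD li j 0)).sum)
      rw [if_neg (by omega),
        pref_get li m (by omega) (by omega), pref_get li (i + 1) (by omega) (by omega),
        range_map_sum li (m - (i + 1)).toNat (i + 1) m le_rfl (by omega) (by omega) (by omega)]
  · rw [if_neg ht, if_neg ht]

-- ===== VERDICT (by name: the statement is the Claim_ definition above) =====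
theorem func_spec : Claim_equal_func := by
  intro li _
  unfold Spec_func
  rw [func_eq_fold, alt_eq_fold]
  by_cases h2 : 2 ≤ (li.length : Int)
  · rw [show ((li.length : Int) - 1) = ((li.length : Int) - 2) + 1 by ring,
      PySem.List.pyRange_one_succ_right (by omega), List.foldl_append,
      List.foldl_cons, List.foldl_nil, stepW_last]
  · rw [PySem.List.pyRange_one_eq_nil (by omega), PySem.List.pyRange_one_eq_nil (by omega)]
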